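-- pv_equiv track=rewrite | github.com/gitit36/CoinMoa | archive/Lighter 복사본/lighter_client.py | get_logs_date_range
-- ===== SOURCE A (Python) =====
-- from typing import Any, Optional, Union
--
-- def get_logs_date_range(logs: list) -> tuple[Optional[str], Optional[str]]:
--     """로그 목록에서 가장 이른/늦은 일시 반환. (oldest, newest)"""
--     if not logs:
--         return (None, None)
--     times = [log.get("time") or "" for log in logs]
--     times = [t.replace("Z", "").replace("T", "-")[:10] for t in times if t]
--     if not times:
--         return (None, None)
--     return (min(times), max(times))
-- ===== SOURCE B (Python) =====
-- def get_logs_date_range(logs: list):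
--     """로그 목록에서 가장 이른/늦은 일시 반환. (oldest, newest)"""
--     oldest = newest = None
--     for log in logs:
--         t = log.get("time") or ""
--         if not t:
--             continue
--         d = t.replace("Z", "").replace("T", "-")[:10]
--         if oldest is None:
--             oldest = newest = d
--         else:
--             if d < oldest:
--                 oldest = d
--             if d > newest:
--                 newest = d
--     return (oldest, newest)
-- ===== Notes on version B (the rewrite author's own statement) =====
-- stated objective: alternative
-- what changed: Replaces the two intermediate list comprehensions plus separate min() and max() scans with a single fold over logs maintaining a running (oldest, newest) pair, building no lists; same O(n) cost.
import Mathlib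
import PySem

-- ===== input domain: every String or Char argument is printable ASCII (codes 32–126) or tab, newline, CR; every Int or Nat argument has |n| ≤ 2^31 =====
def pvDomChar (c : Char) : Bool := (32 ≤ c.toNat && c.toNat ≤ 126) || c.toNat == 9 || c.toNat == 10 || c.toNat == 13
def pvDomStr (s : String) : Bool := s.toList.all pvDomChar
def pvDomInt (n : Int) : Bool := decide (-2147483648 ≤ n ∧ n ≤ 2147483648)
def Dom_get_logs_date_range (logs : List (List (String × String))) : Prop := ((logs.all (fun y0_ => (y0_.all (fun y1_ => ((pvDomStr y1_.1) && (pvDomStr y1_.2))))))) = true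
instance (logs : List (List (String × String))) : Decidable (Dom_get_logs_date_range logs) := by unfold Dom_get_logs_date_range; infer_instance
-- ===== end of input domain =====

-- B changes A's four passes (two list comprehensions, then min and max) into one pass with a
-- running (oldest, newest) pair and no intermediate lists; the return value is identical.

-- ===== PORT A =====
-- log.get("time") or "" : a missing key and an empty value both yield ""
def pvTimeA (log : List (String × String)) : String :=
  ((PySem.Dict.mk log).get? "time").getD ""

-- t.replace("Z", "").replace("T", "-")[:10]
def pvProcA (t : String) : String :=
  PySem.Str.slice (PySem.Str.replace (PySem.Str.replace t "Z" "") "T" "-") none (some 10)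

def get_logs_date_range (logs : List (List (String × String))) : Option String × Option String :=
  if logs = [] then (none, none)
  else
    let times := logs.map pvTimeA
    let times := (times.filter (fun t => t ≠ "")).map pvProcA
    if times = [] then (none, none)
    else (PySem.List.min? times (fun x => x), PySem.List.max? times (fun x => x))

-- ===== PORT B =====
-- one loop body: skip falsy times, else normalise and update the running pair
def pvStepB (st : Option String × Option String) (log : List (String × String)) :
    Option String × Option String :=
  let t := ((PySem.Dict.mk log).get? "time").getD ""
  if t = "" then st
  else
    let d := PySem.Str.slice (PySem.Str.replace (PySem.Str.replace t "Z" "") "T" "-") none (some 10)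
    match st with
    | (some oldest, some newest) =>
        (if d < oldest then some d else some oldest,
         if newest < d then some d else some newest)
    | _ => (some d, some d)

def get_logs_date_range_alt (logs : List (List (String × String))) : Option String × Option String :=
  logs.foldl pvStepB (none, none)

-- ===== PRECONDITION & SPEC =====
def Spec_get_logs_date_range (logs : List (List (String × String))) (out : Option String × Option String) : Prop := out = get_logs_date_range_alt logs
instance (logs : List (List (String × String))) (out : Option String × Option String) : Decidable (Spec_get_logs_date_range logs out) := by unfold Spec_get_logs_date_range; infer_instance

-- ===== CLAIM (what is proved, stated in full; the proofs are below) =====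
def Claim_equal_get_logs_date_range : Prop := ∀ (logs : List (List (String × String))), Dom_get_logs_date_range logs → Spec_get_logs_date_range logs (get_logs_date_range logs)

-- ===== LEMMAS AND PROOFS =====

-- B's fold over logs equals the same fold over A's processed `times` list with a simpler step.
def pvStepT (st : Option String × Option String) (d : String) :
    Option String × Option String :=
  match st with
  | (some oldest, some newest) =>
      (if d < oldest then some d else some oldest,
       if newest < d then some d else some newest)
  | _ => (some d, some d)

lemma stepB_eq (st : Option String × Option String) (l : List (String × String)) :
    pvStepB st l = if pvTimeA l = "" then st else pvStepT st (pvProcA (pvTimeA l)) := rfl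

lemma foldB_eq_foldT (logs : List (List (String × String))) (st : Option String × Option String) :
    logs.foldl pvStepB st
      = (((logs.map pvTimeA).filter (fun t => t ≠ "")).map pvProcA).foldl pvStepT st := by
  induction logs generalizing st with
  | nil => rfl
  | cons l ls ih =>
      simp only [List.map_cons, List.foldl_cons]
      by_cases h : pvTimeA l = ""
      · have hb : (decide (¬ pvTimeA l = "")) = false := by simp [h]
        simp only [List.filter_cons, hb, Bool.false_eq_true, if_false]
        rw [ih, stepB_eq, if_pos h]
      · have hb : (decide (¬ pvTimeA l = "")) = true := by simp [h]
        simp only [List.filter_cons, hb, if_true, List.map_cons, List.foldl_cons]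
        rw [ih, stepB_eq, if_neg h]

lemma foldT_some (ts : List String) (lo hi : String) :
    ts.foldl pvStepT (some lo, some hi)
      = (some (ts.foldl min lo), some (ts.foldl max hi)) := by
  induction ts generalizing lo hi with
  | nil => rfl
  | cons d ts ih =>
      simp only [List.foldl_cons, pvStepT]
      have h1 : (if d < lo then some d else some lo) = some (min lo d) := by
        rcases lt_or_ge d lo with h | h
        · rw [if_pos h, min_eq_right h.le]
        · rw [if_neg (not_lt.mpr h), min_eq_left h]
      have h2 : (if hi < d then some d else some hi) = some (max hi d) := by
        rcases lt_or_ge hi d with h | h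
        · rw [if_pos h, max_eq_right h.le]
        · rw [if_neg (not_lt.mpr h), max_eq_left h]
      rw [h1, h2, ih]

lemma foldT_minmax (d : String) (ts : List String) :
    (d :: ts).foldl pvStepT (none, none)
      = (PySem.List.min? (d :: ts) (fun x => x), PySem.List.max? (d :: ts) (fun x => x)) := by
  rw [PySem.List.min?_id_cons, PySem.List.max?_id_cons]
  simp only [List.foldl_cons, pvStepT]
  exact foldT_some ts d d

lemma minmax_eq_fold (ts : List String) :
    (if ts = [] then ((none, none) : Option String × Option String)
     else (PySem.List.min? ts (fun x => x), PySem.List.max? ts (fun x => x)))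
      = ts.foldl pvStepT (none, none) := by
  cases ts with
  | nil => rfl
  | cons d rest => rw [foldT_minmax]; simp

-- ===== VERDICT (by name: the statement is the Claim_ definition above) =====
theorem get_logs_date_range_spec : Claim_equal_get_logs_date_range := by
  intro logs _
  show get_logs_date_range logs = get_logs_date_range_alt logs
  unfold get_logs_date_range get_logs_date_range_alt
  rw [foldB_eq_foldT]
  by_cases hl : logs = []
  · subst hl; rfl
  · rw [if_neg hl]
    exact minmax_eq_fold _
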